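-- pv_equiv track=rewrite | github.com/a-gaede/cs121-assignment3 | retrieve_one.py | computeLowestPostings
-- ===== SOURCE A (Python) =====
-- def computeLowestPostings(lowest):
--     lowestPostings = {}
--     for post in lowest:
--         docID = post[0]
--         if docID in lowestPostings:
--             lowestPostings[docID].append(post)
--         else:
--             lowestPostings[docID] = [post]
--
--     return lowestPostings
-- ===== SOURCE B (Python) =====
-- def computeLowestPostings(lowest):
--     keys = dict.fromkeys(post[0] for post in lowest)
--     return {docID: [post for post in lowest if post[0] == docID] for docID in keys}
-- ===== Notes on version B (the rewrite author's own statement) =====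
-- stated objective: alternative
-- what changed: Replaces A's single accumulating pass (append-or-create into a growing dict) with a two-phase keys-then-filter construction: first dedup the docIDs in first-occurrence order, then build each group by re-scanning the input once per key.
import Mathlib
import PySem

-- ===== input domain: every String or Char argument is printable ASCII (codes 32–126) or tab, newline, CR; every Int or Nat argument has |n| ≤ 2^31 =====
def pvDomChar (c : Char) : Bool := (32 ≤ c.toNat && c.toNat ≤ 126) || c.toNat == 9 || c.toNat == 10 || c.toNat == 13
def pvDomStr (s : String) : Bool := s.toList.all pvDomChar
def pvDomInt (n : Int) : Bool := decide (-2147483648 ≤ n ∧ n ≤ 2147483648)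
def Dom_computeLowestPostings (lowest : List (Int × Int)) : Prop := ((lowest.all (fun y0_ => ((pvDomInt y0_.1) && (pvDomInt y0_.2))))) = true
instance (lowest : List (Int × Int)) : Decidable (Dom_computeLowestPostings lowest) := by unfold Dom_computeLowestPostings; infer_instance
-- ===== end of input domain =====

-- B builds the grouping as dedup'd keys + one filter per key instead of A's single accumulating dict pass; same result, no speed claim.
-- ===== PORT A =====
-- for post in lowest: append to the existing group or start a new one; return the dict (as its items, insertion order)
def computeLowestPostings (lowest : List (Int × Int)) : List (Int × List (Int × Int)) :=
  (lowest.foldl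
    (fun d post =>
      if d.contains post.1 then d.modify post.1 [] (fun l => l ++ [post])
      else d.insert post.1 [post])
    PySem.Dict.empty).items

-- ===== PORT B =====
-- keys = dict.fromkeys(post[0] for post in lowest); {docID: [post for post in lowest if post[0] == docID] for docID in keys}
def computeLowestPostings_alt (lowest : List (Int × Int)) : List (Int × List (Int × Int)) :=
  (PySem.List.dedup (lowest.map Prod.fst)).map
    (fun docID => (docID, lowest.filter (fun post => post.1 == docID)))

-- ===== PRECONDITION & SPEC =====
def Spec_computeLowestPostings (lowest : List (Int × Int)) (out : List (Int × List (Int × Int))) : Prop := out = computeLowestPostings_alt lowest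
instance (lowest : List (Int × Int)) (out : List (Int × List (Int × Int))) : Decidable (Spec_computeLowestPostings lowest out) := by unfold Spec_computeLowestPostings; infer_instance

-- ===== CLAIM (what is proved, stated in full; the proofs are below) =====
def Claim_equal_computeLowestPostings : Prop := ∀ (lowest : List (Int × Int)), Dom_computeLowestPostings lowest → Spec_computeLowestPostings lowest (computeLowestPostings lowest)

-- ===== LEMMAS AND PROOFS =====

-- ===== VERDICT (by name: the statement is the Claim_ definition above) =====
-- A's per-element step is, in both branches, 'd.modify post.1 [] (· ++ [post])'
theorem stepEq (d : PySem.Dict Int (List (Int × Int))) (post : Int × Int) :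
    (if d.contains post.1 then d.modify post.1 [] (fun l => l ++ [post])
     else d.insert post.1 [post]) = d.modify post.1 [] (fun l => l ++ [post]) := by
  by_cases h : d.contains post.1 = true
  · simp [h]
  · simp only [Bool.not_eq_true] at h
    rw [if_neg (by simp [h]), PySem.Dict.modify, PySem.Dict.getD_of_not_contains _ _ h, List.nil_append]

theorem computeLowestPostings_spec : Claim_equal_computeLowestPostings := by
  intro lowest _
  unfold Spec_computeLowestPostings computeLowestPostings computeLowestPostings_alt
  have hstep : (fun (d : PySem.Dict Int (List (Int × Int))) (post : Int × Int) =>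
      if d.contains post.1 then d.modify post.1 [] (fun l => l ++ [post])
      else d.insert post.1 [post])
      = fun d post => d.modify post.1 [] (fun l => l ++ [post]) :=
    funext fun d => funext fun post => stepEq d post
  rw [hstep]
  have hmap : lowest.foldl (fun d (post : Int × Int) => d.modify post.1 [] (fun l => l ++ [post]))
      PySem.Dict.empty
      = (lowest.map (fun p => (p.1, p))).foldl
          (fun d (q : Int × (Int × Int)) => d.modify q.1 [] (fun l => l ++ [q.2]))
          PySem.Dict.empty := by
    rw [List.foldl_map]
  rw [hmap]
  rw [PySem.Dict.items_eq_map_keys _ (PySem.Dict.nodup_keys_foldl_modify_key _ _ _ _ _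
        (by simp [PySem.Dict.keys_empty])) []]
  rw [PySem.Dict.keys_foldl_modify_key]
  have hkeys : PySem.Set.update (PySem.Dict.empty (κ := Int) (ν := List (Int × Int))).keys
      ((lowest.map (fun p => (p.1, p))).map (fun q => q.1))
      = PySem.List.dedup (lowest.map Prod.fst) := by
    simp [PySem.Dict.keys_empty, List.map_map, PySem.Set.update, ← PySem.Set.ofList_eq_foldl,
      Function.comp_def]
  rw [hkeys]
  apply List.map_congr_left
  intro k _
  rw [PySem.Dict.getD_foldl_modify_append]
  simp [PySem.Dict.getD_empty, List.filter_map, Function.comp_def]
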